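-- pv_equiv track=rewrite | github.com/btieu30/BunchofLunchMunches | app/parse.py | getFilters
-- ===== SOURCE A (Python) =====
-- def getFilters(request: str, seps):
--     output=[]
--     request = request.lower()
--     sepMatched = False
--     for sep in seps:
--         if sep in request:
--             sepMatched=True
--             i = request.index(sep)
--             begin = request[:i].strip()
--             end = request[i+len(sep):].strip()
--             break
--     if sepMatched:
--         if begin: # checks if empty
--             for pair in getFilters(begin, seps):
--                 output.append(pair)
--         if end: # checks if empty
--             for pair in getFilters(end, seps):
--                 output.append(pair)
--         return output
--     else:
--         return (matchArg(request),) #dont remove the comma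
--
-- def matchArg(argument: str) -> list:
--     argument = argument.title()
--     filters= {
--                 "Grade": ['A', 'Z', 'B', 'C', 'N', 'P'],
--                 "Borough": ["Brooklyn", "Manhattan", "Queens", "Staten Island", "Bronx"],
--                 "Cuisine": ['Sandwiches/Salads/Mixed Buffet', 'Salads', 'Egyptian', 'Filipino', 'Seafood', 'Bakery Products/Desserts', 'New American', 'Pancakes/Waffles', 'German', 'Indonesian', 'Lebanese', 'Peruvian', 'Scandinavian', 'Hotdogs/Pretzels', 'Russian', 'Middle Eastern', 'Italian', 'Turkish', 'Caribbean', 'Greek', 'Donuts', 'Tex-Mex', 'African', 'American', 'Jewish/Kosher', 'Continental', 'Chinese/Cuban', 'Portuguese', 'Eastern European', 'Asian/Asian Fusion', 'Soups/Salads/Sandwiches', 'Bangladeshi', 'Tapas', 'Chicken', 'Basque', 'Chilean', 'Other', 'Pakistani', 'Mexican', 'Nuts/Confectionary', 'Spanish', 'Korean', 'Barbecue', 'Frozen Desserts', 'Australian', 'Soups', 'Polish', 'Sandwiches', 'Brazilian', 'Southwestern', 'Pizza', 'Southeast Asian', 'Creole', 'French', 'Fruits/Vegetables', 'Latin American', 'Ethiopian',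 'Thai', 'Hotdogs', 'Creole/Cajun', 'Armenian', 'Chinese', 'Coffee/Tea', 'Vegetarian', 'Juice, Smoothies, Fruit Salads', 'Moroccan', 'Japanese', 'Hamburgers', 'Vegan', 'Irish', 'Czech', 'Fusion', 'Bottled Beverages', 'New French', 'Iranian', 'Chinese/Japanese', 'Californian', 'Steakhouse', 'English', 'Mediterranean', 'Afghan', 'Hawaiian', 'Indian', 'Soul Food', 'Cajun', 'Bagels/Pretzels'],
--                 "SortType": ['name', 'grade', 'iDate', 'cuisine', 'borough'],
--                 "Order": ['asc', 'desc']
--             }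
--     for filter in filters:
--         for type in filters[filter]:
--             if argument in type and argument!="":
--                 return (filter, argument)
--     return ("Name", argument)
-- ===== SOURCE B (Python) =====
-- FILTERS = {
--     "Grade": ['A', 'Z', 'B', 'C', 'N', 'P'],
--     "Borough": ["Brooklyn", "Manhattan", "Queens", "Staten Island", "Bronx"],
--     "Cuisine": ['Sandwiches/Salads/Mixed Buffet', 'Salads', 'Egyptian', 'Filipino', 'Seafood', 'Bakery Products/Desserts', 'New American', 'Pancakes/Waffles', 'German', 'Indonesian', 'Lebanese', 'Peruvian', 'Scandinavian', 'Hotdogs/Pretzels', 'Russian', 'Middle Eastern', 'Italian', 'Turkish', 'Caribbean', 'Greek', 'Donuts', 'Tex-Mex', 'African', 'American', 'Jewish/Kosher', 'Continental', 'Chinese/Cuban', 'Portuguese', 'Eastern European', 'Asian/Asian Fusion', 'Soups/Salads/Sandwiches', 'Bangladeshi', 'Tapas', 'Chicken', 'Basque', 'Chilean', 'Other', 'Pakistani', 'Mexican', 'Nuts/Confectionary', 'Spanish', 'Korean', 'Barbecue', 'Frozen Desserts', 'Australian', 'Soups', 'Polish', 'Sandwiches', 'Brazilian', 'Southwestern',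 'Pizza', 'Southeast Asian', 'Creole', 'French', 'Fruits/Vegetables', 'Latin American', 'Ethiopian', 'Thai', 'Hotdogs', 'Creole/Cajun', 'Armenian', 'Chinese', 'Coffee/Tea', 'Vegetarian', 'Juice, Smoothies, Fruit Salads', 'Moroccan', 'Japanese', 'Hamburgers', 'Vegan', 'Irish', 'Czech', 'Fusion', 'Bottled Beverages', 'New French', 'Iranian', 'Chinese/Japanese', 'Californian', 'Steakhouse', 'English', 'Mediterranean', 'Afghan', 'Hawaiian', 'Indian', 'Soul Food', 'Cajun', 'Bagels/Pretzels'],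
--     "SortType": ['name', 'grade', 'iDate', 'cuisine', 'borough'],
--     "Order": ['asc', 'desc']
-- }
-- # the table flattened once into (category, value) pairs, in the same priority order
-- FLAT = [(cat, val) for cat, vals in FILTERS.items() for val in vals]
--
-- def matchArg(argument: str):
--     argument = argument.title()
--     if argument:
--         for cat, val in FLAT:
--             if argument in val:
--                 return (cat, argument)
--     return ("Name", argument)
--
-- def getFilters(request: str, seps):
--     request = request.lower()
--     if not any(sep in request for sep in seps):
--         return (matchArg(request),)  # same one-element tuple as the original API
--     output = []
--     stack = [request]
--     while stack:
--         segment = stack.pop()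
--         sep = next((s for s in seps if s in segment), None)
--         if sep is None:
--             output.append(matchArg(segment))
--         else:
--             i = segment.index(sep)
--             begin = segment[:i].strip()
--             end = segment[i + len(sep):].strip()
--             if end:
--                 stack.append(end)
--             if begin:
--                 stack.append(begin)
--     return output
-- ===== Notes on version B (the rewrite author's own statement) =====
-- stated objective: alternative
-- what changed: getFilters's recursive splitting is replaced by an iterative explicit-stack worklist that emits leaf segments left to right, and matchArg scans the filter table flattened once into (category, value) pairs instead of a nested dict-of-lists scan.
-- outside the precondition, e.g. on getFilters('', ['']): A returns [], B returns []
import Mathlib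
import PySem

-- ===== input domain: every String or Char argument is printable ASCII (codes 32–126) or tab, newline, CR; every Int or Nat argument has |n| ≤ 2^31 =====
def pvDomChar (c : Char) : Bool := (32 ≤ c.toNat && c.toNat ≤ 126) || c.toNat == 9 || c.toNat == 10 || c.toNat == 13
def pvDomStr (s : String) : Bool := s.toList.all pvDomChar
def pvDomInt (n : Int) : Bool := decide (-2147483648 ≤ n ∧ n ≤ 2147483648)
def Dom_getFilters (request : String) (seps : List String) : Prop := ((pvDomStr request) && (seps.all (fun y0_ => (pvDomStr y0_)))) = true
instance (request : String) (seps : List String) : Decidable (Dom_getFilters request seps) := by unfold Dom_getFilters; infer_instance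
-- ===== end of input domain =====

-- B replaces getFilters's recursion by an iterative explicit-stack worklist and scans a
-- once-flattened (category, value) table in matchArg; same cost, different decomposition.

-- ===== PORT A =====
-- Hand port of `str.title()` (PySem has no title): exact on the ASCII domain, where
-- Python's "cased" characters are exactly the ASCII letters.
def pyTitleStep (acc : List Char × Bool) (c : Char) : List Char × Bool :=
  (acc.1 ++ [if PySem.Chars.isalpha c then
               (if acc.2 then PySem.Chars.lowerChar c else PySem.Chars.upperChar c)
             else c],
   PySem.Chars.isalpha c)

def pyTitle (s : String) : String :=
  String.ofList (s.toList.foldl pyTitleStep ([], false)).1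

def filtersTable : List (String × List String) := [
  ("Grade", ["A", "Z", "B", "C", "N", "P"]),
  ("Borough", ["Brooklyn", "Manhattan", "Queens", "Staten Island", "Bronx"]),
  ("Cuisine", ["Sandwiches/Salads/Mixed Buffet", "Salads", "Egyptian", "Filipino", "Seafood", "Bakery Products/Desserts", "New American", "Pancakes/Waffles", "German", "Indonesian", "Lebanese", "Peruvian", "Scandinavian", "Hotdogs/Pretzels", "Russian", "Middle Eastern", "Italian", "Turkish", "Caribbean", "Greek", "Donuts", "Tex-Mex", "African", "American", "Jewish/Kosher", "Continental", "Chinese/Cuban", "Portuguese", "Eastern European", "Asian/Asian Fusion", "Soups/Salads/Sandwiches", "Bangladeshi", "Tapas", "Chicken", "Basque", "Chilean", "Other", "Pakistani", "Mexican", "Nuts/Confectionary", "Spanish", "Korean", "Barbecue", "Frozen Desserts", "Australian", "Soups", "Polish", "Sandwiches", "Brazilian", "Southwestern", "Pizza", "Southeast Asian", "Creole", "French", "Fruits/Vegetables", "Latin American", "Ethiopian", "Thai", "Hotdogs", "Creole/Cajun", "Armenian", "Chinese", "Coffee/Tea", "Vegetarian", "Juice, Smoothies, Fruit Salads", "Moroccan",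 "Japanese", "Hamburgers", "Vegan", "Irish", "Czech", "Fusion", "Bottled Beverages", "New French", "Iranian", "Chinese/Japanese", "Californian", "Steakhouse", "English", "Mediterranean", "Afghan", "Hawaiian", "Indian", "Soul Food", "Cajun", "Bagels/Pretzels"]),
  ("SortType", ["name", "grade", "iDate", "cuisine", "borough"]),
  ("Order", ["asc", "desc"])]

-- the inner 'for type in filters[filter]' with its early return
def matchInner (f : String) (types : List String) (argument : String) : Option (String × String) :=
  match types with
  | [] => none
  | t :: rest =>
    if PySem.Str.isIn argument t && !(argument == "") then some (f, argument)
    else matchInner f rest argument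

-- the outer 'for filter in filters' with the final return ("Name", argument)
def matchOuter (filters : List (String × List String)) (argument : String) : String × String :=
  match filters with
  | [] => ("Name", argument)
  | (f, types) :: rest =>
    match matchInner f types argument with
    | some r => r
    | none => matchOuter rest argument

def matchArgA (argument : String) : String × String :=
  matchOuter filtersTable (pyTitle argument)

-- 'for sep in seps: if sep in request: … break'
def findSepA (seps : List String) (request : String) : Option String :=
  match seps with
  | [] => none
  | sep :: rest => if PySem.Str.isIn sep request then some sep else findSepA rest request

-- Fuel bounds the recursion depth; request.toList.length + 1 is sufficient whenever every
-- separator is nonempty (Pre_), which is exactly where the Python recursion terminates.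
def getFiltersFuelA (seps : List String) : Nat → String → List (String × String)
  | 0, _ => []
  | fuel+1, request =>
    let request := PySem.Str.lower request
    match findSepA seps request with
    | none => [matchArgA request]   -- Python returns the 1-tuple (matchArg(request),) here
    | some sep =>
      let i : Int := PySem.Str.find request sep
      let begin_ := PySem.Str.strip (PySem.Str.slice request none (some i))
      let end_ := PySem.Str.strip (PySem.Str.slice request (some (i + PySem.Str.len sep)) none)
      (if begin_ ≠ "" then getFiltersFuelA seps fuel begin_ else []) ++
      (if end_ ≠ "" then getFiltersFuelA seps fuel end_ else [])

def getFilters (request : String) (seps : List String) : List (String × String) :=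
  getFiltersFuelA seps (request.toList.length + 1) request

-- ===== PORT B =====
-- FLAT: the table flattened once into (category, value) pairs, in the same priority order
def flatTable : List (String × String) :=
  filtersTable.flatMap (fun p => p.2.map (fun v => (p.1, v)))

def matchArg_alt (argument : String) : String × String :=
  let a := pyTitle argument
  if a == "" then ("Name", a)
  else
    match List.find? (fun p => PySem.Str.isIn a p.2) flatTable with
    | some p => (p.1, a)
    | none => ("Name", a)

-- The worklist loop; the Lean list is the Python stack with its top at the HEAD
-- (stack.pop() = take the head, the two appends = prepend begin before end).
-- Fuel bounds the number of iterations; 2*len+2 is sufficient under Pre_.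
def bLoop (seps : List String) : Nat → List String → List (String × String) → List (String × String)
  | fuel+1, seg :: rest, out =>
    match List.find? (fun sep => PySem.Str.isIn sep seg) seps with
    | none => bLoop seps fuel rest (out ++ [matchArg_alt seg])
    | some sep =>
      let i : Int := PySem.Str.find seg sep
      let begin_ := PySem.Str.strip (PySem.Str.slice seg none (some i))
      let end_ := PySem.Str.strip (PySem.Str.slice seg (some (i + PySem.Str.len sep)) none)
      bLoop seps fuel ((if begin_ ≠ "" then [begin_] else []) ++
                       (if end_ ≠ "" then [end_] else []) ++ rest) out
  | _, _, out => out

def getFilters_alt (request : String) (seps : List String) : List (String × String) :=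
  let r := PySem.Str.lower request
  if seps.any (fun sep => PySem.Str.isIn sep r) then
    bLoop seps (2 * request.toList.length + 2) [r] []
  else
    [matchArg_alt r]   -- Python returns the 1-tuple (matchArg(r),) here, like A

-- ===== PRECONDITION & SPEC =====
-- Pre_ excludes an empty-string separator: there the split makes no progress, so the Python
-- recursion terminates only for effectively-empty requests (returning []) and otherwise
-- overflows the stack with RecursionError; B's loop likewise never finishes there.
def Pre_getFilters (request : String) (seps : List String) : Prop := "" ∉ seps
instance (request : String) (seps : List String) : Decidable (Pre_getFilters request seps) := by unfold Pre_getFilters; infer_instance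

def pvWitness_getFilters : String × List String := ("pizza and Brooklyn", [" and ", ","])

def Spec_getFilters (request : String) (seps : List String) (out : List (String × String)) : Prop := out = getFilters_alt request seps
instance (request : String) (seps : List String) (out : List (String × String)) : Decidable (Spec_getFilters request seps out) := by unfold Spec_getFilters; infer_instance

-- ===== CLAIM (what is proved, stated in full; the proofs are below) =====
def Claim_equal_getFilters : Prop := ∀ (request : String) (seps : List String), Dom_getFilters request seps → Pre_getFilters request seps → Spec_getFilters request seps (getFilters request seps)

-- ===== LEMMAS AND PROOFS =====

-- proof-side abbreviation: A's recursion at its sufficient fuel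
def pvGf (seps : List String) (s : String) : List (String × String) :=
  getFiltersFuelA seps (s.toList.length + 1) s

theorem pv_toNat_le_of_le {c d : Char} (h : c ≤ d) : c.toNat ≤ d.toNat := by
  rw [Char.le_def] at h; exact h

theorem pv_lowerChar_idem (c : Char) :
    PySem.Chars.lowerChar (PySem.Chars.lowerChar c) = PySem.Chars.lowerChar c := by
  unfold PySem.Chars.lowerChar PySem.Chars.isupper
  by_cases h1 : 'A' ≤ c
  · by_cases h2 : c ≤ 'Z'
    · have hA' : (65:Nat) ≤ c.toNat := by simpa using pv_toNat_le_of_le h1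
      have hZ' : c.toNat ≤ 90 := by simpa using pv_toNat_le_of_le h2
      have hb : ¬ (Char.ofNat (c.toNat + 32) ≤ 'Z') := by
        intro hb
        have h3 := pv_toNat_le_of_le hb
        rw [Char.toNat_ofNat, if_pos (Or.inl (by omega))] at h3
        simp at h3
        omega
      simp [h1, h2, hb]
    · simp [h2]
  · simp [h1]

theorem pv_lowered_of_chars {s : String}
    (h : ∀ c ∈ s.toList, PySem.Chars.lowerChar c = c) : PySem.Str.lower s = s := by
  rw [← String.toList_inj, PySem.Str.toList_lower]
  unfold PySem.Chars.lower
  calc List.map PySem.Chars.lowerChar s.toList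
      = List.map id s.toList := List.map_congr_left h
    _ = s.toList := List.map_id s.toList

theorem pv_chars_lower (s : String) :
    ∀ c ∈ (PySem.Str.lower s).toList, PySem.Chars.lowerChar c = c := by
  intro c hc
  rw [PySem.Str.toList_lower] at hc
  unfold PySem.Chars.lower at hc
  obtain ⟨x, -, rfl⟩ := List.mem_map.mp hc
  exact pv_lowerChar_idem x

theorem pv_len_lower (s : String) :
    (PySem.Str.lower s).toList.length = s.toList.length := by
  rw [PySem.Str.toList_lower]; unfold PySem.Chars.lower; exact List.length_map ..

theorem pv_mem_strip {s : String} {c : Char} (h : c ∈ (PySem.Str.strip s).toList) :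
    c ∈ s.toList := by
  rw [PySem.Str.toList_strip] at h
  unfold PySem.Chars.strip PySem.Chars.rstrip PySem.Chars.lstrip at h
  rw [List.mem_reverse] at h
  have h2 := (List.dropWhile_sublist (l := (List.dropWhile PySem.Chars.isspace s.toList).reverse) PySem.Chars.isspace).subset h
  rw [List.mem_reverse] at h2
  exact (List.dropWhile_sublist PySem.Chars.isspace).subset h2

theorem pv_len_strip_le (s : String) :
    (PySem.Str.strip s).toList.length ≤ s.toList.length := by
  rw [PySem.Str.toList_strip]
  unfold PySem.Chars.strip PySem.Chars.rstrip PySem.Chars.lstrip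
  calc ((List.dropWhile PySem.Chars.isspace (List.dropWhile PySem.Chars.isspace s.toList).reverse).reverse).length
      ≤ ((List.dropWhile PySem.Chars.isspace s.toList).reverse).length := by
        rw [List.length_reverse]
        exact (List.dropWhile_sublist _).length_le
    _ ≤ s.toList.length := by
        rw [List.length_reverse]
        exact (List.dropWhile_sublist _).length_le

theorem pv_toList_ne {s : String} (h : s ≠ "") : s.toList ≠ [] := by
  intro h0
  exact h (String.toList_inj.mp (by simpa using h0))

theorem pv_find_nonneg {r sep : String} (h : PySem.Str.isIn sep r = true) :
    0 ≤ PySem.Str.find r sep := by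
  rw [PySem.Str.find_nonneg_iff]
  exact (PySem.Str.isIn_iff_infix sep r).mp h

theorem pv_find_add_le {r sep : String} (h : PySem.Str.isIn sep r = true) :
    (PySem.Str.find r sep).toNat + sep.toList.length ≤ r.toList.length := by
  have h0 : (0:Int) ≤ PySem.Chars.find r.toList sep.toList := by
    simpa using pv_find_nonneg h
  have hp := (PySem.Chars.find_spec h0).1
  have hl := hp.length_le
  rw [List.length_drop] at hl
  have hle : PySem.Chars.find r.toList sep.toList ≤ (r.toList.length : Int) :=
    PySem.Chars.find_le_length r.toList sep.toList
  have : PySem.Str.find r sep = PySem.Chars.find r.toList sep.toList := by simp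
  rw [this]
  omega

-- the two segments of a split step, on the Chars side
theorem pv_begin_toList (r sep : String) (h : PySem.Str.isIn sep r = true) :
    (PySem.Str.slice r none (some (PySem.Str.find r sep))).toList
      = r.toList.take (PySem.Str.find r sep).toNat := by
  rw [PySem.Str.toList_slice]
  simp only [PySem.Chars.slice_eq_listSlice]
  exact PySem.List.slice_to r.toList (pv_find_nonneg h)

theorem pv_end_toList (r sep : String) (h : PySem.Str.isIn sep r = true) :
    (PySem.Str.slice r (some (PySem.Str.find r sep + PySem.Str.len sep)) none).toList
      = r.toList.drop ((PySem.Str.find r sep).toNat + sep.toList.length) := by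
  have h0 := pv_find_nonneg h
  have hlen : PySem.Str.len sep = (sep.toList.length : Int) := PySem.Str.len_eq sep
  rw [PySem.Str.toList_slice]
  simp only [PySem.Chars.slice_eq_listSlice]
  rw [PySem.List.slice_from r.toList (by omega)]
  congr 1
  omega

-- the bundle of facts one split step provides
theorem pv_step_facts {seps : List String} (hsep : "" ∉ seps) {r sep : String}
    (hmem : sep ∈ seps) (hin : PySem.Str.isIn sep r = true) :
    (PySem.Str.strip (PySem.Str.slice r none (some (PySem.Str.find r sep)))).toList.length
      + (PySem.Str.strip (PySem.Str.slice r (some (PySem.Str.find r sep + PySem.Str.len sep)) none)).toList.length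
      + sep.toList.length ≤ r.toList.length
    ∧ 1 ≤ sep.toList.length
    ∧ (∀ c ∈ (PySem.Str.strip (PySem.Str.slice r none (some (PySem.Str.find r sep)))).toList, c ∈ r.toList)
    ∧ (∀ c ∈ (PySem.Str.strip (PySem.Str.slice r (some (PySem.Str.find r sep + PySem.Str.len sep)) none)).toList, c ∈ r.toList) := by
  have hne : sep.toList ≠ [] := pv_toList_ne (by rintro rfl; exact hsep hmem)
  have h1 : 1 ≤ sep.toList.length := by
    cases h : sep.toList with
    | nil => exact absurd h hne
    | cons a l => simp
  have hb := pv_len_strip_le (PySem.Str.slice r none (some (PySem.Str.find r sep)))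
  rw [pv_begin_toList r sep hin, List.length_take] at hb
  have he := pv_len_strip_le (PySem.Str.slice r (some (PySem.Str.find r sep + PySem.Str.len sep)) none)
  rw [pv_end_toList r sep hin, List.length_drop] at he
  have hadd := pv_find_add_le hin
  refine ⟨by omega, h1, ?_, ?_⟩
  · intro c hc
    have := pv_mem_strip hc
    rw [pv_begin_toList r sep hin] at this
    exact List.mem_of_mem_take this
  · intro c hc
    have := pv_mem_strip hc
    rw [pv_end_toList r sep hin] at this
    exact List.mem_of_mem_drop this

theorem pv_findSepA_eq (seps : List String) (r : String) :
    findSepA seps r = List.find? (fun sep => PySem.Str.isIn sep r) seps := by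
  induction seps with
  | nil => rfl
  | cons s rest ih =>
    unfold findSepA
    rw [List.find?_cons]
    by_cases h : PySem.Str.isIn s r = true
    · simp only [PySem.Str.isIn_eq] at h
      simp [h]
    · simp only [Bool.not_eq_true, PySem.Str.isIn_eq] at h
      simp [h, ih]

-- matchArg: A's nested table scan equals B's scan of the flattened table
theorem pv_matchInner_empty (f : String) (ts : List String) :
    matchInner f ts "" = none := by
  induction ts with
  | nil => rfl
  | cons t rest ih => simpa [matchInner] using ih

theorem pv_matchInner_eq (f : String) (ts : List String) {a : String} (ha : a ≠ "") :
    matchInner f ts a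
      = (List.find? (fun t => PySem.Str.isIn a t) ts).map (fun _ => (f, a)) := by
  induction ts with
  | nil => rfl
  | cons t rest ih =>
    unfold matchInner
    rw [List.find?_cons]
    by_cases h : PySem.Str.isIn a t = true
    · simp only [PySem.Str.isIn_eq] at h
      simp [h, ha]
    · simp only [Bool.not_eq_true, PySem.Str.isIn_eq] at h
      simp [h, ih]

theorem pv_matchOuter_eq (tbl : List (String × List String)) {a : String} (ha : a ≠ "") :
    matchOuter tbl a
      = (match List.find? (fun p => PySem.Str.isIn a p.2)
            (tbl.flatMap (fun p => p.2.map (fun v => (p.1, v)))) with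
         | some p => (p.1, a)
         | none => ("Name", a)) := by
  induction tbl with
  | nil => rfl
  | cons hd rest ih =>
    obtain ⟨f, ts⟩ := hd
    unfold matchOuter
    rw [pv_matchInner_eq f ts ha]
    rw [List.flatMap_cons, List.find?_append, List.find?_map]
    have hcomp : ((fun p => PySem.Str.isIn a p.2) ∘ (fun v => (f, v)))
        = fun t => PySem.Str.isIn a t := rfl
    rw [hcomp]
    cases hfind : List.find? (fun t => PySem.Str.isIn a t) ts with
    | none => simpa using ih
    | some t => simp

theorem pv_matchArg_eq (arg : String) : matchArgA arg = matchArg_alt arg := by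
  unfold matchArgA matchArg_alt
  by_cases h : pyTitle arg = ""
  · rw [h]
    simp only [BEq.rfl, if_true]
    have : ∀ tbl, matchOuter tbl "" = ("Name", "") := by
      intro tbl
      induction tbl with
      | nil => rfl
      | cons hd rest ih =>
        obtain ⟨f, ts⟩ := hd
        unfold matchOuter
        rw [pv_matchInner_empty]
        exact ih
    exact this filtersTable
  · rw [pv_matchOuter_eq filtersTable h]
    simp only [flatTable]
    rw [if_neg (by simpa using h)]

-- fuel irrelevance for A above the sufficient bound
theorem pv_A_fuel {seps : List String} (hsep : "" ∉ seps) :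
    ∀ (n : Nat) (s : String) (f : Nat), s.toList.length ≤ n → s.toList.length < f →
      getFiltersFuelA seps f s = pvGf seps s := by
  intro n
  induction n with
  | zero =>
    intro s f hn hf
    obtain ⟨g, rfl⟩ : ∃ g, f = g + 1 := ⟨f - 1, by omega⟩
    have hs0 : s.toList.length = 0 := by omega
    unfold pvGf
    rw [hs0]
    simp only [getFiltersFuelA]
    cases hfs : findSepA seps (PySem.Str.lower s) with
    | none => rfl
    | some sep =>
      exfalso
      rw [pv_findSepA_eq] at hfs
      have hin := List.find?_some hfs
      have hmem := List.mem_of_find?_eq_some hfs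
      have hinf := (PySem.Str.isIn_iff_infix sep (PySem.Str.lower s)).mp hin
      have hne : sep.toList ≠ [] := pv_toList_ne (by rintro rfl; exact hsep hmem)
      have hlen := hinf.length_le
      rw [pv_len_lower, hs0] at hlen
      cases h : sep.toList with
      | nil => exact hne h
      | cons a l => rw [h] at hlen; simp at hlen
  | succ n ih =>
    intro s f hn hf
    obtain ⟨g, rfl⟩ : ∃ g, f = g + 1 := ⟨f - 1, by omega⟩
    unfold pvGf
    simp only [getFiltersFuelA]
    cases hfs : findSepA seps (PySem.Str.lower s) with
    | none => rfl
    | some sep =>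
      dsimp only
      rw [pv_findSepA_eq] at hfs
      have hin := List.find?_some hfs
      have hmem := List.mem_of_find?_eq_some hfs
      obtain ⟨hsum, hone, -, -⟩ := pv_step_facts hsep hmem hin
      rw [pv_len_lower] at hsum
      set r := PySem.Str.lower s with hr
      set b := PySem.Str.strip (PySem.Str.slice r none (some (PySem.Str.find r sep))) with hbdef
      set e := PySem.Str.strip (PySem.Str.slice r (some (PySem.Str.find r sep + PySem.Str.len sep)) none) with hedef
      rw [ih b g (by omega) (by omega), ih b s.toList.length (by omega) (by omega),
          ih e g (by omega) (by omega), ih e s.toList.length (by omega) (by omega)]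

-- one unfolding of A's recursion on an already-lowered string, phrased via find?
theorem pv_gf_step {seps : List String} (hsep : "" ∉ seps) (s : String)
    (hlow : ∀ c ∈ s.toList, PySem.Chars.lowerChar c = c) :
    pvGf seps s
      = (match List.find? (fun sep => PySem.Str.isIn sep s) seps with
         | none => [matchArgA s]
         | some sep =>
           (if PySem.Str.strip (PySem.Str.slice s none (some (PySem.Str.find s sep))) ≠ ""
            then pvGf seps (PySem.Str.strip (PySem.Str.slice s none (some (PySem.Str.find s sep)))) else []) ++
           (if PySem.Str.strip (PySem.Str.slice s (some (PySem.Str.find s sep + PySem.Str.len sep)) none) ≠ ""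
            then pvGf seps (PySem.Str.strip (PySem.Str.slice s (some (PySem.Str.find s sep + PySem.Str.len sep)) none)) else [])) := by
  have hls : PySem.Str.lower s = s := pv_lowered_of_chars hlow
  conv_lhs => rw [pvGf]
  simp only [getFiltersFuelA, hls, pv_findSepA_eq]
  cases hfs : List.find? (fun sep => PySem.Str.isIn sep s) seps with
  | none => rfl
  | some sep =>
    dsimp only
    have hin := List.find?_some hfs
    have hmem := List.mem_of_find?_eq_some hfs
    obtain ⟨hsum, hone, -, -⟩ := pv_step_facts hsep hmem hin
    set b := PySem.Str.strip (PySem.Str.slice s none (some (PySem.Str.find s sep))) with hbdef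
    set e := PySem.Str.strip (PySem.Str.slice s (some (PySem.Str.find s sep + PySem.Str.len sep)) none) with hedef
    rw [pv_A_fuel hsep b.toList.length b s.toList.length (by omega) (by omega),
        pv_A_fuel hsep e.toList.length e s.toList.length (by omega) (by omega)]

-- B's worklist equals the concatenation of A's results over the stack
theorem pv_B_loop {seps : List String} (hsep : "" ∉ seps) :
    ∀ (fuel : Nat) (stack : List String) (out : List (String × String)),
      (∀ s ∈ stack, ∀ c ∈ s.toList, PySem.Chars.lowerChar c = c) →
      (stack.map (fun s => 2 * s.toList.length + 1)).sum ≤ fuel →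
      bLoop seps fuel stack out = out ++ (stack.map (pvGf seps)).flatten := by
  intro fuel
  induction fuel with
  | zero =>
    intro stack out hlow hsum
    cases stack with
    | nil => simp [bLoop]
    | cons s rest =>
      simp only [List.map_cons, List.sum_cons] at hsum
      omega
  | succ f ih =>
    intro stack out hlow hsum
    cases stack with
    | nil => simp [bLoop]
    | cons seg rest =>
      simp only [List.map_cons, List.sum_cons] at hsum
      have hlowseg := hlow seg (List.mem_cons_self ..)
      have hlowrest : ∀ s ∈ rest, ∀ c ∈ s.toList, PySem.Chars.lowerChar c = c :=
        fun s hs => hlow s (List.mem_cons_of_mem _ hs)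
      simp only [bLoop]
      cases hfs : List.find? (fun sep => PySem.Str.isIn sep seg) seps with
      | none =>
        dsimp only
        rw [ih rest (out ++ [matchArg_alt seg]) hlowrest (by omega)]
        simp only [List.map_cons, List.flatten_cons]
        rw [pv_gf_step hsep seg hlowseg, hfs]
        simp [pv_matchArg_eq]
      | some sep =>
        dsimp only
        have hin := List.find?_some hfs
        have hmem := List.mem_of_find?_eq_some hfs
        obtain ⟨hsum2, hone, hbm, hem⟩ := pv_step_facts hsep hmem hin
        set b := PySem.Str.strip (PySem.Str.slice seg none (some (PySem.Str.find seg sep))) with hbdef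
        set e := PySem.Str.strip (PySem.Str.slice seg (some (PySem.Str.find seg sep + PySem.Str.len sep)) none) with hedef
        have hlowb : ∀ c ∈ b.toList, PySem.Chars.lowerChar c = c :=
          fun c hc => hlowseg c (hbm c hc)
        have hlowe : ∀ c ∈ e.toList, PySem.Chars.lowerChar c = c :=
          fun c hc => hlowseg c (hem c hc)
        have hnewlow : ∀ s ∈ ((if b ≠ "" then [b] else []) ++ (if e ≠ "" then [e] else []) ++ rest),
            ∀ c ∈ s.toList, PySem.Chars.lowerChar c = c := by
          intro s hs
          simp only [List.mem_append] at hs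
          rcases hs with (hs | hs) | hs
          · split at hs <;> simp at hs
            subst hs; exact hlowb
          · split at hs <;> simp at hs
            subst hs; exact hlowe
          · exact hlowrest s hs
        have hnewsum : (((if b ≠ "" then [b] else []) ++ (if e ≠ "" then [e] else []) ++ rest).map
            (fun s => 2 * s.toList.length + 1)).sum ≤ f := by
          simp only [List.map_append, List.sum_append]
          split_ifs <;>
            simp only [List.map_cons, List.map_nil, List.sum_cons, List.sum_nil] <;> omega
        rw [ih _ out hnewlow hnewsum]
        simp only [List.map_cons, List.flatten_cons]
        rw [pv_gf_step hsep seg hlowseg, hfs]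
        dsimp only
        rw [← hbdef, ← hedef]
        simp only [List.map_append, List.flatten_append]
        split_ifs <;> simp

-- A's top level equals A's recursion applied to the lowered request
theorem pv_A_top (seps : List String) (request : String) :
    getFilters request seps = pvGf seps (PySem.Str.lower request) := by
  have hll : PySem.Str.lower (PySem.Str.lower request) = PySem.Str.lower request :=
    pv_lowered_of_chars (pv_chars_lower request)
  unfold getFilters pvGf
  rw [pv_len_lower]
  simp only [getFiltersFuelA, hll]

-- ===== VERDICT (by name: the statement is the Claim_ definition above) =====
theorem getFilters_spec : Claim_equal_getFilters := by
  intro request seps hdom hpre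
  unfold Spec_getFilters
  rw [pv_A_top]
  unfold getFilters_alt
  by_cases hany : seps.any (fun sep => PySem.Str.isIn sep (PySem.Str.lower request)) = true
  · rw [if_pos hany]
    rw [pv_B_loop hpre (2 * request.toList.length + 2) [PySem.Str.lower request] []
        (by intro s hs; simp at hs; subst hs; exact pv_chars_lower request)
        (by simp only [List.map_cons, List.map_nil, List.sum_cons, List.sum_nil, pv_len_lower]
            omega)]
    simp
  · rw [if_neg hany]
    have hfs : List.find? (fun sep => PySem.Str.isIn sep (PySem.Str.lower request)) seps = none := by
      rw [List.find?_eq_none]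
      intro x hx
      rw [Bool.not_eq_true, List.any_eq_false] at hany
      exact fun hc => (hany x hx) (by simpa using hc)
    rw [pv_gf_step hpre (PySem.Str.lower request) (pv_chars_lower request), hfs]
    simp [pv_matchArg_eq]
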